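-- pv_equiv track=rewrite | github.com/jspaaks/aoc | 2023/src/09/test_p2.py | calc_diffs
-- ===== SOURCE A (Python) =====
-- def calc_diffs(history):
--     diffs = []
--     diff = history
--     for _ in range(len(history) - 1):
--         diffs.append(diff)
--         if set(diff) == {0}:
--             break
--         diff = [b - a for b, a in zip(diff[1:], diff[0:-1])]
--     return diffs
-- ===== SOURCE B (Python) =====
-- def calc_diffs(history):
--     if len(history) < 2:
--         return []
--     if set(history) == {0}:
--         return [history]
--     return [history] + calc_diffs([b - a for b, a in zip(history[1:], history[0:-1])])
-- ===== Notes on version B (the rewrite author's own statement) =====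
-- stated objective: simpler
-- what changed: Replaced the counted for-loop with break/accumulator-append by direct recursion on the shrinking difference row (base case len<2, zero row emitted as final singleton).
import Mathlib
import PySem

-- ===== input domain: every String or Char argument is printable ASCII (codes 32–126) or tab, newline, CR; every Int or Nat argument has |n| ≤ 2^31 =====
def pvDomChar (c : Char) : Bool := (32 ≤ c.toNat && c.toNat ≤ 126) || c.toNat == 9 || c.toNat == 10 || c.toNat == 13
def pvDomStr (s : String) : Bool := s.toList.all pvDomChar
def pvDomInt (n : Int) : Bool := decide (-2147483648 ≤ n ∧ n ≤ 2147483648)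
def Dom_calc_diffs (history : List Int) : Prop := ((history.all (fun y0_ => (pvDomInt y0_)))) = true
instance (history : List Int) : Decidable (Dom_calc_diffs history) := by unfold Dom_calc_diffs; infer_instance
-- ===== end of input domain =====

-- B replaces A's counted loop with break by direct recursion on the shrinking row: simpler decomposition, same values.

-- [b - a for b, a in zip(xs[1:], xs[0:-1])]  (shared line of Python in both versions)
def pvDiffRow (xs : List Int) : List Int :=
  List.zipWith (fun b a => b - a) (PySem.List.slice xs (some 1) none) (PySem.List.slice xs (some 0) (some (-1)))

-- used by B's port for termination (and by the proofs)
theorem pvDiffRow_eq (xs : List Int) : pvDiffRow xs = List.zipWith (fun b a => b - a) xs.tail xs.dropLast := by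
  simp [pvDiffRow, PySem.List.slice_from_one, PySem.List.slice_to_neg_one]

theorem pvDiffRow_length (xs : List Int) : (pvDiffRow xs).length = xs.length - 1 := by
  simp [pvDiffRow_eq, List.length_zipWith, List.length_dropLast, List.length_tail]

-- ===== PORT A =====
-- the 'for _ in range(len(history)-1)' loop: fuel = remaining iterations; break returns the accumulator
def pvCalcLoop : Nat → List Int → List (List Int) → List (List Int)
  | 0, _, diffs => diffs
  | k+1, diff, diffs =>
    if PySem.Set.equal (PySem.Set.ofList diff) (PySem.Set.ofList [(0 : Int)]) then
      diffs ++ [diff]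
    else
      pvCalcLoop k (pvDiffRow diff) (diffs ++ [diff])

def calc_diffs (history : List Int) : List (List Int) :=
  pvCalcLoop (history.length - 1) history []

-- ===== PORT B =====
def calc_diffs_alt (history : List Int) : List (List Int) :=
  if history.length < 2 then []
  else if PySem.Set.equal (PySem.Set.ofList history) (PySem.Set.ofList [(0 : Int)]) then
    [history]
  else
    history :: calc_diffs_alt (pvDiffRow history)
termination_by history.length
decreasing_by simp [pvDiffRow_length]; omega

-- ===== PRECONDITION & SPEC =====
def Spec_calc_diffs (history : List Int) (out : List (List Int)) : Prop := out = calc_diffs_alt history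
instance (history : List Int) (out : List (List Int)) : Decidable (Spec_calc_diffs history out) := by unfold Spec_calc_diffs; infer_instance

-- ===== CLAIM (what is proved, stated in full; the proofs are below) =====
def Claim_equal_calc_diffs : Prop := ∀ (history : List Int), Dom_calc_diffs history → Spec_calc_diffs history (calc_diffs history)

-- ===== LEMMAS AND PROOFS =====

-- loop invariant: with fuel = len(diff) - 1 the loop appends exactly B's rows to the accumulator
theorem pvCalcLoop_eq (n : Nat) :
    ∀ (diff : List Int), diff.length = n →
      ∀ (acc : List (List Int)), pvCalcLoop (diff.length - 1) diff acc = acc ++ calc_diffs_alt diff := by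
  induction n using Nat.strong_induction_on with
  | _ n ih =>
    intro diff hlen acc
    by_cases h2 : diff.length < 2
    · have h0 : diff.length - 1 = 0 := by omega
      rw [h0, calc_diffs_alt, if_pos h2]
      simp [pvCalcLoop]
    · obtain ⟨k, hk⟩ : ∃ k, diff.length - 1 = k + 1 := ⟨diff.length - 2, by omega⟩
      rw [hk, calc_diffs_alt, if_neg h2]
      by_cases hz : PySem.Set.equal (PySem.Set.ofList diff) (PySem.Set.ofList [(0 : Int)]) = true
      · simp [pvCalcLoop, hz]
      · simp only [pvCalcLoop, if_neg hz, Bool.not_eq_true] at *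
        have hlen' : (pvDiffRow diff).length = k + 1 := by rw [pvDiffRow_length]; omega
        have := ih (k + 1) (by omega) (pvDiffRow diff) hlen' (acc ++ [diff])
        rw [hlen'] at this
        simp only [Nat.add_sub_cancel] at this
        rw [this]
        simp

-- ===== VERDICT (by name: the statement is the Claim_ definition above) =====
theorem calc_diffs_spec : Claim_equal_calc_diffs := by
  intro history _
  unfold Spec_calc_diffs calc_diffs
  exact pvCalcLoop_eq history.length history rfl []
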